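-- pv_equiv track=rewrite | github.com/andreugallofre/AoC2022 | day01/problem.py | aux_func
-- ===== SOURCE A (Python) =====
-- def aux_func(problem_input: list) -> list:
--     curr = 0
--     elfs = []
--     for elf in problem_input:
--         elf = elf.strip()
--         if elf:
--             curr += int(elf)
--         else:
--             elfs.append(curr)
--             curr = 0
--
--     elfs.append(curr)
--
--     return elfs
-- ===== SOURCE B (Python) =====
-- def aux_func(problem_input: list) -> list:
--     groups = [[]]
--     for line in problem_input:
--         line = line.strip()
--         if line:
--             groups[-1].append(int(line))
--         else:
--             groups.append([])
--     return [sum(g) for g in groups]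
-- ===== Notes on version B (the rewrite author's own statement) =====
-- stated objective: alternative
-- what changed: B first materializes the list of groups of parsed integers (keeping empty groups for consecutive/trailing blanks) and then sums each group in a separate pass, instead of A's single pass with a running accumulator.
import Mathlib
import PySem

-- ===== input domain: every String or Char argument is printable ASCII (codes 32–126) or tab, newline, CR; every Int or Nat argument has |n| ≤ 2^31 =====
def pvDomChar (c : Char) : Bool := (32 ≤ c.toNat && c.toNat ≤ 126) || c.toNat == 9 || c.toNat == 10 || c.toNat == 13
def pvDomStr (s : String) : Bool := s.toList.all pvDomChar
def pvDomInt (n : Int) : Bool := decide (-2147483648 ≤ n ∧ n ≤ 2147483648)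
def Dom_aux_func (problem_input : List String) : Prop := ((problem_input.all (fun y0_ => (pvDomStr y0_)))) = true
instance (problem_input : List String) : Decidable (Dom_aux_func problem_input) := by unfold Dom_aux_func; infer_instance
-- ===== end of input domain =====

-- B builds the explicit list of groups of parsed integers first and sums each group
-- in a separate pass, instead of A's single pass with a running accumulator (alternative decomposition).

-- ===== PORT A =====
def aux_func (problem_input : List String) : List Int :=
  let st := problem_input.foldl
    (fun (st : Int × List Int) elf =>
      let e := PySem.Str.strip elf
      if e ≠ "" then (st.1 + (PySem.Int.ofStr? e).getD 0, st.2)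
      else (0, st.2 ++ [st.1]))
    (0, [])
  st.2 ++ [st.1]

-- ===== PORT B =====
def aux_func_alt (problem_input : List String) : List Int :=
  let groups := problem_input.foldl
    (fun (gs : List (List Int)) line =>
      let t := PySem.Str.strip line
      if t ≠ "" then gs.dropLast ++ [gs.getLastD [] ++ [(PySem.Int.ofStr? t).getD 0]]
      else gs ++ [[]])
    [[]]
  groups.map (fun g => g.foldl (· + ·) 0)

-- ===== PRECONDITION & SPEC =====
-- Pre_ excludes exactly the inputs on which Python's int() raises ValueError in A
-- (a stripped non-empty line that is not a valid integer literal, e.g. "0x10" or "abc").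
def Pre_aux_func (problem_input : List String) : Prop :=
  ∀ s ∈ problem_input,
    PySem.Str.strip s ≠ "" → (PySem.Int.ofStr? (PySem.Str.strip s)).isSome = true
instance (problem_input : List String) : Decidable (Pre_aux_func problem_input) := by
  unfold Pre_aux_func; infer_instance

def pvWitness_aux_func : List String := ["1", " 2 ", "", "+3"]

def Spec_aux_func (problem_input : List String) (out : List Int) : Prop := out = aux_func_alt problem_input
instance (problem_input : List String) (out : List Int) : Decidable (Spec_aux_func problem_input out) := by unfold Spec_aux_func; infer_instance

-- ===== CLAIM (what is proved, stated in full; the proofs are below) =====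
def Claim_equal_aux_func : Prop := ∀ (problem_input : List String), Dom_aux_func problem_input → Pre_aux_func problem_input → Spec_aux_func problem_input (aux_func problem_input)

-- ===== LEMMAS AND PROOFS =====

-- A's loop body
def pvStepA (st : Int × List Int) (elf : String) : Int × List Int :=
  let e := PySem.Str.strip elf
  if e ≠ "" then (st.1 + (PySem.Int.ofStr? e).getD 0, st.2)
  else (0, st.2 ++ [st.1])

-- B's loop body
def pvStepB (gs : List (List Int)) (line : String) : List (List Int) :=
  let t := PySem.Str.strip line
  if t ≠ "" then gs.dropLast ++ [gs.getLastD [] ++ [(PySem.Int.ofStr? t).getD 0]]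
  else gs ++ [[]]

def pvMsum : List Int → Int := fun g => g.foldl (· + ·) 0

lemma pv_key (l : List String) : ∀ (gs' : List (List Int)) (g : List Int),
    ((l.foldl pvStepB (gs' ++ [g])).map pvMsum)
      = (l.foldl pvStepA (pvMsum g, gs'.map pvMsum)).2
          ++ [(l.foldl pvStepA (pvMsum g, gs'.map pvMsum)).1] := by
  induction l with
  | nil => intro gs' g; simp
  | cons s l ih =>
    intro gs' g
    simp only [List.foldl_cons]
    by_cases hb : PySem.Str.strip s = ""
    · have h1 : pvStepB (gs' ++ [g]) s = (gs' ++ [g]) ++ [[]] := by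
        simp [pvStepB, hb]
      have h2 : pvStepA (pvMsum g, gs'.map pvMsum) s = (0, gs'.map pvMsum ++ [pvMsum g]) := by
        simp [pvStepA, hb]
      rw [h1, h2]
      have := ih (gs' ++ [g]) []
      simpa [pvMsum] using this
    · set v : Int := (PySem.Int.ofStr? (PySem.Str.strip s)).getD 0 with hv
      have h1 : pvStepB (gs' ++ [g]) s = gs' ++ [g ++ [v]] := by
        simp [pvStepB, hb, hv]
      have h2 : pvStepA (pvMsum g, gs'.map pvMsum) s = (pvMsum g + v, gs'.map pvMsum) := by
        simp [pvStepA, hb, hv]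
      rw [h1, h2]
      have := ih gs' (g ++ [v])
      have hsum : pvMsum (g ++ [v]) = pvMsum g + v := by
        simp [pvMsum, List.foldl_append]
      rw [hsum] at this
      exact this

-- ===== VERDICT (by name: the statement is the Claim_ definition above) =====
theorem aux_func_spec : Claim_equal_aux_func := by
  intro pi _ _
  show aux_func pi = aux_func_alt pi
  exact (pv_key pi [] []).symm
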